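-- pv_equiv track=rewrite | github.com/ZetDude/jospel | jospel_commentless.py | detect_one_by_one_changing_list
-- ===== SOURCE A (Python) =====
-- def detect_one_by_one_changing_list(given_list):
--     direction = 0
--     for y, i in enumerate(given_list):
--         if y == 0:
--             continue
--         if direction == 0:
--             if given_list[y-1] == i + 1:
--                 direction = 1
--             elif given_list[y-1] == i - 1:
--                 direction = -1
--             else:
--                 return False
--         else:
--             if given_list[y-1] != i + direction:
--                 return False
--     return True
-- ===== SOURCE B (Python) =====
-- def detect_one_by_one_changing_list(given_list):
--     n = len(given_list)
--     if n < 2: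
--         return True
--     start = given_list[0]
--     return given_list == list(range(start, start + n)) or \
--         given_list == list(range(start, start - n, -1))
-- ===== Notes on version B (the rewrite author's own statement) =====
-- stated objective: alternative
-- what changed: Replaces A's per-step direction state machine with generate-and-compare: build the two candidate arithmetic sequences range(start, start+n) and range(start, start-n, -1) and test whole-list equality against them.
import Mathlib
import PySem

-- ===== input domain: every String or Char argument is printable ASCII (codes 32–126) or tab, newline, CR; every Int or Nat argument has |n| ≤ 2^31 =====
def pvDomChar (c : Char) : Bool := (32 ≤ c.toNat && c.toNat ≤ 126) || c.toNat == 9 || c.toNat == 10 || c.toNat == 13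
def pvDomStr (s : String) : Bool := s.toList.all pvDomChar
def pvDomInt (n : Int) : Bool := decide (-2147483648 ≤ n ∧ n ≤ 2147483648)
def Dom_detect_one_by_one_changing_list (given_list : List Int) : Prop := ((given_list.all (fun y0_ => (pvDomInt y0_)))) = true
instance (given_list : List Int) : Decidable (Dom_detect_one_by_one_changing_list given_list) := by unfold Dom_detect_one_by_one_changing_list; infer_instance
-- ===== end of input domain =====

-- B replaces A's direction state machine by generate-and-compare: build the two candidate
-- arithmetic sequences range(start, start+n) and range(start, start-n, -1) and test
-- whole-list equality (objective: alternative, same cost).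

-- ===== PORT A =====
-- the 'for y, i in enumerate(given_list)' loop, with 'direction' as state;
-- 'given_list[y-1]' is always in range when read (y ≥ 1), so .getD 0 is never the default
def pvALoop (xs : List Int) (direction : Int) : List (Int × Int) → Bool
  | [] => true
  | (y, i) :: rest =>
    if y = 0 then pvALoop xs direction rest
    else
      let prev := (PySem.List.pyGet? xs (y - 1)).getD 0
      if direction = 0 then
        if prev = i + 1 then pvALoop xs 1 rest
        else if prev = i - 1 then pvALoop xs (-1) rest
        else false
      else
        if prev ≠ i + direction then false else pvALoop xs direction rest

def detect_one_by_one_changing_list (given_list : List Int) : Bool :=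
  pvALoop given_list 0 (PySem.List.enumerate given_list)

-- ===== PORT B =====
-- n = len; n < 2 → True; else compare against list(range(start, start+n)) and
-- list(range(start, start-n, -1))
def detect_one_by_one_changing_list_alt (given_list : List Int) : Bool :=
  let n : Int := given_list.length
  if n < 2 then true
  else
    let start := (PySem.List.pyGet? given_list 0).getD 0
    (given_list == PySem.List.pyRange start (start + n) 1) ||
    (given_list == PySem.List.pyRange start (start - n) (-1))

-- ===== PRECONDITION & SPEC =====
def Spec_detect_one_by_one_changing_list (given_list : List Int) (out : Bool) : Prop := out = detect_one_by_one_changing_list_alt given_list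
instance (given_list : List Int) (out : Bool) : Decidable (Spec_detect_one_by_one_changing_list given_list out) := by unfold Spec_detect_one_by_one_changing_list; infer_instance

-- ===== CLAIM (what is proved, stated in full; the proofs are below) =====
def Claim_equal_detect_one_by_one_changing_list : Prop := ∀ (given_list : List Int), Dom_detect_one_by_one_changing_list given_list → Spec_detect_one_by_one_changing_list given_list (detect_one_by_one_changing_list given_list)

-- ===== LEMMAS AND PROOFS =====

-- A's state machine rewritten over explicit (prev, cur) pairs (proof-only helper)
def pvPairLoop (direction : Int) : List (Int × Int) → Bool
  | [] => true
  | (p, c) :: rest =>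
    if direction = 0 then
      if p = c + 1 then pvPairLoop 1 rest
      else if p = c - 1 then pvPairLoop (-1) rest
      else false
    else
      if p ≠ c + direction then false else pvPairLoop direction rest

theorem pvAllShift (rest : List (Int × Int)) (d : Int) :
    (rest.all fun q => decide (q.1 = q.2 + d)) = rest.all (fun p => decide (p.2 - p.1 = -d)) := by
  congr 1; funext q; simp only [decide_eq_decide]; omega

theorem pvALoop_eq_pairLoop (ys : List Int) : ∀ (xs : List Int) (k : Nat) (a d : Int),
    xs.drop (k - 1) = a :: ys → 1 ≤ k →
    pvALoop xs d (PySem.List.enumerate ys (k : Int)) = pvPairLoop d ((a :: ys).zip ys) := by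
  induction ys with
  | nil => intro xs k a d _ _; simp [pvALoop, pvPairLoop, PySem.List.enumerate_nil]
  | cons b ys ih =>
    intro xs k a d hdrop hk
    have hky : ¬ ((k : Int) = 0) := by omega
    have hget : PySem.List.pyGet? xs ((k : Int) - 1) = some a := by
      have h1 : ((k : Int) - 1) = ((k - 1 : Nat) : Int) := by omega
      have hx : xs[(k - 1 : Nat)]? = some a := by
        have h0 : (xs.drop (k - 1))[0]? = some a := by rw [hdrop]; rfl
        simpa [List.getElem?_drop] using h0
      rw [h1, PySem.List.pyGet?_natCast, hx]
    have hdrop' : xs.drop ((k + 1) - 1) = b :: ys := by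
      have : xs.drop k = (xs.drop (k - 1)).drop 1 := by
        rw [List.drop_drop]; congr 1; omega
      simp [this, hdrop]
    have ih' := fun d => ih xs (k + 1) b d (by simpa using hdrop') (by omega)
    have hcast : ((k : Int) + 1) = (((k + 1 : Nat)) : Int) := by push_cast; ring
    rw [PySem.List.enumerate_cons, List.zip_cons_cons]
    simp only [pvALoop, pvPairLoop, if_neg hky, hget, Option.getD_some, hcast]
    split_ifs <;> first | rfl | exact ih' _

-- with a fixed direction the machine just checks every pair satisfies p = c + d
theorem pvPairLoop_fixed (d : Int) (hd : d ≠ 0) : ∀ (ps : List (Int × Int)),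
    pvPairLoop d ps = ps.all (fun q => q.1 = q.2 + d) := by
  intro ps
  induction ps with
  | nil => simp [pvPairLoop]
  | cons q rest ih =>
    obtain ⟨p, c⟩ := q
    by_cases h : p = c + d <;> simp [pvPairLoop, hd, h, ih]

-- from the neutral state, the machine accepts exactly the all-(+1) and all-(-1) pair lists
theorem pvPairLoop_zero (ps : List (Int × Int)) :
    pvPairLoop 0 ps =
      (ps.all (fun q => decide (q.2 - q.1 = 1)) || ps.all (fun q => decide (q.2 - q.1 = -1))) := by
  cases ps with
  | nil => simp [pvPairLoop]
  | cons q rest =>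
    obtain ⟨p, c⟩ := q
    by_cases h1 : p = c + 1
    · have e1 : pvPairLoop 0 ((p, c) :: rest) = pvPairLoop 1 rest := by
        simp [pvPairLoop, h1]
      have hc1 : ¬ (c - p = 1) := by omega
      have hc2 : c - p = -1 := by omega
      rw [e1, pvPairLoop_fixed 1 (by norm_num), pvAllShift rest 1]
      simp [hc2]
    · by_cases h2 : p = c - 1
      · have e1 : pvPairLoop 0 ((p, c) :: rest) = pvPairLoop (-1) rest := by
          simp only [pvPairLoop]
          rw [if_pos trivial, if_neg h1, if_pos h2]
        have hc1 : c - p = 1 := by omega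
        rw [e1, pvPairLoop_fixed (-1) (by norm_num), pvAllShift rest (-1)]
        simp [hc1]
      · have hc1 : ¬ (c - p = 1) := by omega
        have hc2 : ¬ (c - p = -1) := by omega
        simp [pvPairLoop, h1, h2, hc1, hc2]

-- whole-list equality with the ascending range ↔ every consecutive pair steps by +1
theorem pvRangeUp (t : List Int) : ∀ (x : Int),
    ((x :: t) == PySem.List.pyRange x (x + ((t.length : Int) + 1)) 1) =
      ((x :: t).zip t).all (fun q => decide (q.2 - q.1 = 1)) := by
  induction t with
  | nil =>
    intro x
    simp only [List.length_nil, Nat.cast_zero, zero_add]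
    rw [PySem.List.pyRange_one_singleton]
    simp
  | cons b t ih =>
    intro x
    simp only [List.length_cons, Nat.cast_add, Nat.cast_one]
    have h0 : (0 : Int) ≤ (t.length : Int) := by positivity
    have hlt : x < x + ((t.length : Int) + 1 + 1) := by omega
    rw [PySem.List.pyRange_one_cons hlt]
    by_cases hb : b = x + 1
    · subst hb
      have hih := ih (x + 1)
      rw [show x + ((t.length : Int) + 1 + 1) = (x + 1) + ((t.length : Int) + 1) by ring]
      simp only [List.cons_beq_cons, beq_self_eq_true, Bool.true_and, List.zip_cons_cons,
        List.all_cons]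
      rw [hih]
      have hone : x + 1 - x = (1 : Int) := by ring
      simp [hone]
    · have hd : ¬ (b - x = 1) := by omega
      have hlt2 : x + 1 < x + ((t.length : Int) + 1 + 1) := by omega
      rw [PySem.List.pyRange_one_cons hlt2]
      simp [List.cons_beq_cons, hb, hd]

-- whole-list equality with the descending range ↔ every consecutive pair steps by -1
theorem pvRangeDown (t : List Int) : ∀ (x : Int),
    ((x :: t) == PySem.List.pyRange x (x - ((t.length : Int) + 1)) (-1)) =
      ((x :: t).zip t).all (fun q => decide (q.2 - q.1 = -1)) := by
  induction t with
  | nil =>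
    intro x
    simp only [List.length_nil, Nat.cast_zero, zero_add]
    rw [PySem.List.pyRange_neg_one_cons (show x - 1 < x by omega)]
    rw [PySem.List.pyRange_neg_one_eq_nil (le_refl (x - 1))]
    simp
  | cons b t ih =>
    intro x
    simp only [List.length_cons, Nat.cast_add, Nat.cast_one]
    have h0 : (0 : Int) ≤ (t.length : Int) := by positivity
    have hlt : x - ((t.length : Int) + 1 + 1) < x := by omega
    rw [PySem.List.pyRange_neg_one_cons hlt]
    by_cases hb : b = x - 1
    · subst hb
      have hih := ih (x - 1)
      rw [show x - ((t.length : Int) + 1 + 1) = (x - 1) - ((t.length : Int) + 1) by ring]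
      simp only [List.cons_beq_cons, beq_self_eq_true, Bool.true_and, List.zip_cons_cons,
        List.all_cons]
      rw [hih]
      have hone : x - 1 - x = (-1 : Int) := by ring
      simp [hone]
    · have hd : ¬ (b - x = -1) := by omega
      have hlt2 : x - 1 - ((t.length : Int) + 1) < x - 1 := by omega
      rw [show x - ((t.length : Int) + 1 + 1) = (x - 1) - ((t.length : Int) + 1) by ring]
      rw [PySem.List.pyRange_neg_one_cons hlt2]
      simp [List.cons_beq_cons, hb, hd]

-- ===== VERDICT (by name: the statement is the Claim_ definition above) =====
theorem detect_one_by_one_changing_list_spec : Claim_equal_detect_one_by_one_changing_list := by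
  intro xs _
  unfold Spec_detect_one_by_one_changing_list detect_one_by_one_changing_list detect_one_by_one_changing_list_alt
  match xs with
  | [] => simp [pvALoop, PySem.List.enumerate_nil]
  | [x] => simp [pvALoop, PySem.List.enumerate_cons, PySem.List.enumerate_nil]
  | x :: b :: t =>
    -- A's side: reduce to the pair machine, then to the two all-tests
    have h0 : pvALoop (x :: b :: t) 0 (PySem.List.enumerate (x :: b :: t)) =
        pvALoop (x :: b :: t) 0 (PySem.List.enumerate (b :: t) 1) := by
      rw [PySem.List.enumerate_cons]
      simp [pvALoop]
    rw [h0]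
    have h := pvALoop_eq_pairLoop (b :: t) (x :: b :: t) 1 x 0 (by simp) (by omega)
    simp only [Nat.cast_one] at h
    rw [h, pvPairLoop_zero]
    -- B's side: the branch test fails (n ≥ 2), then the two range-equality lemmas
    have hget : (PySem.List.pyGet? (x :: b :: t) 0).getD 0 = x := by
      have : (0:Int) ≤ (t.length : Int) + 1 := by positivity
      simp [PySem.List.pyGet?, PySem.List.pyIdx?, this]
    have hlen : ((x :: b :: t).length : Int) = ((b :: t).length : Int) + 1 := by
      simp
    simp only [hget, hlen]
    rw [pvRangeUp (b :: t) x, pvRangeDown (b :: t) x]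
    simp [List.zip_cons_cons]
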